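-- pv_equiv track=rewrite | github.com/lfspeers/osrs_simulator | combat/equipment.py | _has_obsidian_set
-- ===== SOURCE A (Python) =====
-- from typing import Dict, Optional, List, TYPE_CHECKING
--
-- def _has_obsidian_set(item_names: List[str]) -> bool:
--     """Check for full Obsidian armour set with obsidian weapon."""
--     has_helm = any("obsidian_helmet" in name for name in item_names)
--     has_body = any("obsidian_platebody" in name for name in item_names)
--     has_legs = any("obsidian_platelegs" in name for name in item_names)
--     has_weapon = any(
--         "toktz" in name or "tzhaar" in name or "obsidian" in name
--         for name in item_names
--         if "helmet" not in name and "platebody" not in name and "platelegs" not in name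
--     )
--     return has_helm and has_body and has_legs and has_weapon
-- ===== SOURCE B (Python) =====
-- def _has_obsidian_set(item_names):
--     """Check for full Obsidian armour set with obsidian weapon (single pass)."""
--     has_helm = has_body = has_legs = has_weapon = False
--     for name in item_names:
--         if "obsidian_helmet" in name:
--             has_helm = True
--         if "obsidian_platebody" in name:
--             has_body = True
--         if "obsidian_platelegs" in name:
--             has_legs = True
--         if ("helmet" not in name and "platebody" not in name
--                 and "platelegs" not in name
--                 and ("toktz" in name or "tzhaar" in name or "obsidian" in name)):
--             has_weapon = True
--     return has_helm and has_body and has_legs and has_weapon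
-- ===== Notes on version B (the rewrite author's own statement) =====
-- stated objective: simpler
-- what changed: Replaces A's four separate any()-scans (one with an inline filter) by a single for-loop over the list that maintains four booleans, returning their conjunction.
import Mathlib
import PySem

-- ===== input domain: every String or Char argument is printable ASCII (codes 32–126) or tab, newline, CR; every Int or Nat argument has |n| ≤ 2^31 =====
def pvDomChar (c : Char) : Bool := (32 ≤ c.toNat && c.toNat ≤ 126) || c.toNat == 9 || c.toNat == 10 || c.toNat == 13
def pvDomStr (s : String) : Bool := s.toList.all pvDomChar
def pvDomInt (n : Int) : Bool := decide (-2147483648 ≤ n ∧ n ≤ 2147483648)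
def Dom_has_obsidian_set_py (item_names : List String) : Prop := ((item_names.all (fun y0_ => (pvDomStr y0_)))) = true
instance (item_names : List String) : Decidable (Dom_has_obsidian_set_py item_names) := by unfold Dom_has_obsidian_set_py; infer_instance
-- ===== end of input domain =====

-- ===== PORT A =====
-- Port of A: four any-scans, the weapon one over a filtered list (the 'if' in the genexp).
def has_obsidian_set_py (item_names : List String) : Bool :=
  let has_helm := item_names.any (fun name => PySem.Str.isIn "obsidian_helmet" name)
  let has_body := item_names.any (fun name => PySem.Str.isIn "obsidian_platebody" name)
  let has_legs := item_names.any (fun name => PySem.Str.isIn "obsidian_platelegs" name)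
  let has_weapon := (item_names.filter (fun name =>
      !PySem.Str.isIn "helmet" name && !PySem.Str.isIn "platebody" name
        && !PySem.Str.isIn "platelegs" name)).any (fun name =>
      PySem.Str.isIn "toktz" name || PySem.Str.isIn "tzhaar" name
        || PySem.Str.isIn "obsidian" name)
  has_helm && has_body && has_legs && has_weapon

-- ===== PORT B =====
-- Port of B: one fold over the list maintaining four booleans.
def has_obsidian_set_py_alt (item_names : List String) : Bool :=
  let st := item_names.foldl (fun (s : Bool × Bool × Bool × Bool) name =>
      (s.1 || PySem.Str.isIn "obsidian_helmet" name,
       s.2.1 || PySem.Str.isIn "obsidian_platebody" name,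
       s.2.2.1 || PySem.Str.isIn "obsidian_platelegs" name,
       s.2.2.2 || (!PySem.Str.isIn "helmet" name && !PySem.Str.isIn "platebody" name
         && !PySem.Str.isIn "platelegs" name
         && (PySem.Str.isIn "toktz" name || PySem.Str.isIn "tzhaar" name
           || PySem.Str.isIn "obsidian" name)))) (false, false, false, false)
  st.1 && st.2.1 && st.2.2.1 && st.2.2.2

-- ===== PRECONDITION & SPEC =====
def Spec_has_obsidian_set_py (item_names : List String) (out : Bool) : Prop := out = has_obsidian_set_py_alt item_names
instance (item_names : List String) (out : Bool) : Decidable (Spec_has_obsidian_set_py item_names out) := by unfold Spec_has_obsidian_set_py; infer_instance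

-- ===== CLAIM (what is proved, stated in full; the proofs are below) =====
def Claim_equal_has_obsidian_set_py : Prop := ∀ (item_names : List String), Dom_has_obsidian_set_py item_names → Spec_has_obsidian_set_py item_names (has_obsidian_set_py item_names)

-- ===== LEMMAS AND PROOFS =====

-- ===== VERDICT (by name: the statement is the Claim_ definition above) =====
-- The fold's state is the componentwise 'or' of the initial state with the four scans.
theorem obsidian_fold_eq (xs : List String) (s : Bool × Bool × Bool × Bool) :
    xs.foldl (fun (s : Bool × Bool × Bool × Bool) name =>
      (s.1 || PySem.Str.isIn "obsidian_helmet" name,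
       s.2.1 || PySem.Str.isIn "obsidian_platebody" name,
       s.2.2.1 || PySem.Str.isIn "obsidian_platelegs" name,
       s.2.2.2 || (!PySem.Str.isIn "helmet" name && !PySem.Str.isIn "platebody" name
         && !PySem.Str.isIn "platelegs" name
         && (PySem.Str.isIn "toktz" name || PySem.Str.isIn "tzhaar" name
           || PySem.Str.isIn "obsidian" name)))) s
    = (s.1 || xs.any (fun name => PySem.Str.isIn "obsidian_helmet" name),
       s.2.1 || xs.any (fun name => PySem.Str.isIn "obsidian_platebody" name),
       s.2.2.1 || xs.any (fun name => PySem.Str.isIn "obsidian_platelegs" name),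
       s.2.2.2 || xs.any (fun name =>
         !PySem.Str.isIn "helmet" name && !PySem.Str.isIn "platebody" name
           && !PySem.Str.isIn "platelegs" name
           && (PySem.Str.isIn "toktz" name || PySem.Str.isIn "tzhaar" name
             || PySem.Str.isIn "obsidian" name))) := by
  induction xs generalizing s with
  | nil => simp
  | cons x xs ih => rw [List.foldl_cons, ih]; simp [Bool.or_assoc]

-- A's filtered any is the any of the conjunction of filter and predicate.
theorem any_filter_eq (xs : List String) (p q : String → Bool) :
    (xs.filter p).any q = xs.any (fun x => p x && q x) := by
  induction xs with
  | nil => rfl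
  | cons x xs ih => by_cases h : p x <;> simp [h, ih]

theorem has_obsidian_set_py_spec : Claim_equal_has_obsidian_set_py := by
  intro xs _
  unfold Spec_has_obsidian_set_py has_obsidian_set_py has_obsidian_set_py_alt
  rw [obsidian_fold_eq, any_filter_eq]
  simp
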